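-- pv_equiv track=rewrite | github.com/BrendanCoughlan/cryptopals | util.py | repeating_zip
-- ===== SOURCE A (Python) =====
-- def repeating_zip(left, right):
--     """Zip, repeating the shorter as necessary"""
--     left_len = len(left)
--     right_len = len(right)
--     if left_len == 0 or right_len == 0:
--         raise ValueError("Inputs can't be empty")
--     for ii in range(max(left_len, right_len)):
--         left_index = ii % left_len
--         right_index = ii % right_len
--         yield left[left_index], right[right_index]
-- ===== SOURCE B (Python) =====
-- def _cycle(xs):
--     """Yield the elements of xs over and over."""
--     while True:
--         for x in xs:
--             yield x
--
--
-- def _take(n, it):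
--     """Yield the first n elements of iterator it."""
--     count = 0
--     for x in it:
--         if count >= n:
--             return
--         yield x
--         count += 1
--
--
-- def repeating_zip(left, right):
--     """Zip, repeating the shorter as necessary"""
--     if len(left) == 0 or len(right) == 0:
--         raise ValueError("Inputs can't be empty")
--     n = max(len(left), len(right))
--     yield from zip(_take(n, _cycle(left)), _take(n, _cycle(right)))
-- ===== Notes on version B (the rewrite author's own statement) =====
-- stated objective: alternative
-- what changed: Replaces the index loop with modulo arithmetic (left[ii % left_len]) by streaming two cyclic generators and zipping their first max(len) elements, so no index computation occurs; the empty-input ValueError guard is kept as in A.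
import Mathlib
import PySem

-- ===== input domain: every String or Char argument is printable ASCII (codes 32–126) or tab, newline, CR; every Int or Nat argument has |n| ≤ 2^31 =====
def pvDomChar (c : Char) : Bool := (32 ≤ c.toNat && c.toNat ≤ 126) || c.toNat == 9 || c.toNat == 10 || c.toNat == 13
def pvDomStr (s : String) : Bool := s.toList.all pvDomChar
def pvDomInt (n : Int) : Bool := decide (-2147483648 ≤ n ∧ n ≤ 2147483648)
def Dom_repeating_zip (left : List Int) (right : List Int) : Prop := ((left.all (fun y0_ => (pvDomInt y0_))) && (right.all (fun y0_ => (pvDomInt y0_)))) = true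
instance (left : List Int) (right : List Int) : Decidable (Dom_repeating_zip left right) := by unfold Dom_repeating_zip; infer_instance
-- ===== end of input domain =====

-- B streams two cyclic generators and zips their first max(len) elements instead of
-- indexing with modulo arithmetic; alternative decomposition, same cost; B keeps A's
-- ValueError guard on empty input (both ports return [] there, outside Pre_).
-- (A is a generator; equivalence is about the produced sequence of pairs as a list.)

-- ===== PORT A =====
-- literal port of A's index loop; the 'raise ValueError' branch (outside Pre_) yields [].
def repeating_zip (left : List Int) (right : List Int) : List (Int × Int) :=
  let left_len : Int := left.length
  let right_len : Int := right.length
  if left_len = 0 ∨ right_len = 0 then []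
  else
    (PySem.List.pyRange 0 (max left_len right_len) 1).foldl
      (fun acc ii =>
        acc ++ [(PySem.List.pyGetD left (PySem.Int.mod ii left_len) 0,
                 PySem.List.pyGetD right (PySem.Int.mod ii right_len) 0)]) []

-- ===== PORT B =====
-- _take n (_cycle xs) : first n elements of the cyclic stream over xs (refills from orig
-- when the current tail is exhausted, exactly like Source B's _cycle).
def cycleTake : Nat → List Int → List Int → List Int
  | 0, _, _ => []
  | Nat.succ n, c :: cs, orig => c :: cycleTake n cs orig
  | Nat.succ n, [], orig =>
    match orig with
    | [] => []
    | o :: os => o :: cycleTake n os orig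

-- the 'raise ValueError' guard (outside Pre_) yields [].
def repeating_zip_alt (left : List Int) (right : List Int) : List (Int × Int) :=
  if left.length = 0 ∨ right.length = 0 then []
  else
    let n := max left.length right.length
    List.zip (cycleTake n left left) (cycleTake n right right)

-- ===== PRECONDITION & SPEC =====
-- Pre_ excludes exactly the inputs with an empty side, where both Pythons raise ValueError.
def Pre_repeating_zip (left : List Int) (right : List Int) : Prop := left ≠ [] ∧ right ≠ []
instance (left : List Int) (right : List Int) : Decidable (Pre_repeating_zip left right) := by
  unfold Pre_repeating_zip; infer_instance
def pvWitness_repeating_zip : List Int × List Int := ([1, 2, 3], [4, 5])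

def Spec_repeating_zip (left : List Int) (right : List Int) (out : List (Int × Int)) : Prop :=
  out = repeating_zip_alt left right
instance (left : List Int) (right : List Int) (out : List (Int × Int)) :
    Decidable (Spec_repeating_zip left right out) := by unfold Spec_repeating_zip; infer_instance

-- ===== CLAIM (what is proved, stated in full; the proofs are below) =====
def Claim_equal_repeating_zip : Prop := ∀ (left : List Int) (right : List Int),
  Dom_repeating_zip left right → Pre_repeating_zip left right →
  Spec_repeating_zip left right (repeating_zip left right)

-- ===== LEMMAS AND PROOFS =====

theorem cycleTake_nil_refill (n : Nat) (orig : List Int) :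
    cycleTake n [] orig = cycleTake n orig orig := by
  cases n with
  | zero => cases orig <;> rfl
  | succ n => cases orig <;> rfl

theorem cycleTake_drop (orig : List Int) (n k : Nat) (hk : k < orig.length) :
    cycleTake n (orig.drop k) orig
      = (List.range n).map (fun i => orig.getD ((k + i) % orig.length) 0) := by
  induction n generalizing k with
  | zero => simp [cycleTake]
  | succ n ih =>
    rw [List.drop_eq_getElem_cons hk, List.range_succ_eq_map]
    show orig[k] :: cycleTake n (orig.drop (k + 1)) orig = _
    simp only [List.map_cons, List.map_map]
    refine congrArg₂ _ ?_ ?_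
    · simp [Nat.mod_eq_of_lt hk, List.getD_eq_getElem?_getD, List.getElem?_eq_getElem hk]
    · by_cases h : k + 1 < orig.length
      · rw [ih (k + 1) h]
        apply List.map_congr_left
        intro i _
        simp only [Function.comp_apply, Nat.succ_eq_add_one]
        congr 2
        omega
      · have hlen : k + 1 = orig.length := by omega
        have h0 := ih 0 (by omega)
        simp only [List.drop_zero, Nat.zero_add] at h0
        rw [hlen, List.drop_length, cycleTake_nil_refill, h0]
        apply List.map_congr_left
        intro i _
        simp only [Function.comp_apply, Nat.succ_eq_add_one]
        rw [show k + (i + 1) = orig.length + i from by omega, Nat.add_mod_left]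

theorem cycleTake_self (xs : List Int) (n : Nat) (hx : xs ≠ []) :
    cycleTake n xs xs = (List.range n).map (fun i => xs.getD (i % xs.length) 0) := by
  have := cycleTake_drop xs n 0 (by cases xs <;> simp_all)
  simpa using this

-- ===== VERDICT (by name: the statement is the Claim_ definition above) =====
theorem repeating_zip_spec : Claim_equal_repeating_zip := by
  intro left right _ hpre
  obtain ⟨hl, hr⟩ := hpre
  unfold Spec_repeating_zip repeating_zip repeating_zip_alt
  have hl0 : 0 < left.length := List.length_pos_of_ne_nil hl
  have hr0 : 0 < right.length := List.length_pos_of_ne_nil hr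
  simp only []
  rw [if_neg (by omega), if_neg (by omega)]
  have hmax : (max (left.length : Int) (right.length : Int))
      = ((max left.length right.length : Nat) : Int) := by push_cast; rfl
  rw [hmax, PySem.List.pyRange_zero_natCast, List.foldl_map,
      PySem.List.foldl_append_singleton_eq_map, List.nil_append,
      cycleTake_self left _ hl, cycleTake_self right _ hr, List.zip_map']
  apply List.map_congr_left
  intro i _
  simp only [PySem.Int.mod_natCast, PySem.List.pyGetD_natCast, List.getD_eq_getElem?_getD]
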